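-- pv_equiv track=rewrite | github.com/RF2005/UFCML | src/utils/utils.py | create_rating_categories
-- ===== SOURCE A (Python) =====
-- def create_rating_categories(fighter_ratings):
--     """
--     Categorize fighters by their Elo ratings.
--
--     Args:
--         fighter_ratings (dict): Dictionary of fighter names and ratings
--
--     Returns:
--         dict: Dictionary of rating categories with fighter lists
--     """
--     categories = {
--         'Elite (1650+)': [],
--         'Excellent (1550-1649)': [],
--         'Good (1450-1549)': [],
--         'Average (1350-1449)': [],
--         'Below Average (<1350)': []
--     }
--
--     for fighter, rating in fighter_ratings.items():
--         if rating >= 1650: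
--             categories['Elite (1650+)'].append((fighter, rating))
--         elif rating >= 1550:
--             categories['Excellent (1550-1649)'].append((fighter, rating))
--         elif rating >= 1450:
--             categories['Good (1450-1549)'].append((fighter, rating))
--         elif rating >= 1350:
--             categories['Average (1350-1449)'].append((fighter, rating))
--         else:
--             categories['Below Average (<1350)'].append((fighter, rating))
--
--     # Sort each category by rating
--     for category in categories:
--         categories[category].sort(key=lambda x: x[1], reverse=True)
--
--     return categories
-- ===== SOURCE B (Python) =====
-- def create_rating_categories(fighter_ratings):
--     """Categorize fighters by Elo: sort all fighters once by rating descending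
--     (stable), then build each bucket as a comprehension over the ranked list --
--     each bucket is automatically sorted, no per-bucket sort needed."""
--     ranked = sorted(fighter_ratings.items(), key=lambda x: x[1], reverse=True)
--     return {
--         'Elite (1650+)': [p for p in ranked if p[1] >= 1650],
--         'Excellent (1550-1649)': [p for p in ranked if 1550 <= p[1] < 1650],
--         'Good (1450-1549)': [p for p in ranked if 1450 <= p[1] < 1550],
--         'Average (1350-1449)': [p for p in ranked if 1350 <= p[1] < 1450],
--         'Below Average (<1350)': [p for p in ranked if p[1] < 1350],
--     }
-- ===== Notes on version B (the rewrite author's own statement) =====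
-- stated objective: simpler
-- what changed: B sorts all fighters once by rating descending (stable) and builds each of the five buckets directly as a range-filter comprehension over the ranked list, instead of A's imperative bucketing loop followed by a per-bucket sort.
import Mathlib
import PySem

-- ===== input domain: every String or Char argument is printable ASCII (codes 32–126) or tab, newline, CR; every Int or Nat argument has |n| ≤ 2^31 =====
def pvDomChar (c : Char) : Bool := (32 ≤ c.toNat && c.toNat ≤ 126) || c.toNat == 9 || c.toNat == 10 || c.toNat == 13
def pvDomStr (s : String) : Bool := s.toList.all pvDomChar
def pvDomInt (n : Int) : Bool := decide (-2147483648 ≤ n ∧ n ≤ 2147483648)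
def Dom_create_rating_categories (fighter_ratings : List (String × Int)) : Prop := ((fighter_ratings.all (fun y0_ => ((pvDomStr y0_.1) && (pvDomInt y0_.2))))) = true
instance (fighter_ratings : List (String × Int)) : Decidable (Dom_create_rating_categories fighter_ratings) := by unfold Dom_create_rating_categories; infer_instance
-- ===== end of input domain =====

-- B sorts all fighters once by rating descending (stable) and builds each bucket
-- as a filter of the ranked list, instead of A's bucketing loop plus per-bucket
-- sorts (objective: simpler).


-- ===== PORT A =====
-- categories[k].append(x) on an always-present key k is exactly Dict.modify k [] (· ++ [x]);
-- categories[category].sort(key=..., reverse=True) (in-place) is insert of the sorted value.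
def create_rating_categories (fighter_ratings : List (String × Int)) : List (String × List (String × Int)) :=
  let categories : PySem.Dict String (List (String × Int)) :=
    PySem.Dict.ofList [("Elite (1650+)", []), ("Excellent (1550-1649)", []),
      ("Good (1450-1549)", []), ("Average (1350-1449)", []), ("Below Average (<1350)", [])]
  let categories := fighter_ratings.foldl (fun cats fr =>
    if fr.2 ≥ 1650 then cats.modify "Elite (1650+)" [] (· ++ [(fr.1, fr.2)])
    else if fr.2 ≥ 1550 then cats.modify "Excellent (1550-1649)" [] (· ++ [(fr.1, fr.2)])
    else if fr.2 ≥ 1450 then cats.modify "Good (1450-1549)" [] (· ++ [(fr.1, fr.2)])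
    else if fr.2 ≥ 1350 then cats.modify "Average (1350-1449)" [] (· ++ [(fr.1, fr.2)])
    else cats.modify "Below Average (<1350)" [] (· ++ [(fr.1, fr.2)])) categories
  let categories := categories.keys.foldl (fun cats c =>
    cats.insert c (PySem.List.sorted (cats.getD c []) (fun x => x.2) true)) categories
  categories.items

-- ===== PORT B =====
-- a dict literal of five comprehensions over the ranked list
def create_rating_categories_alt (fighter_ratings : List (String × Int)) : List (String × List (String × Int)) :=
  let ranked := PySem.List.sorted fighter_ratings (fun x => x.2) true
  [("Elite (1650+)", ranked.filter (fun p => decide (p.2 ≥ 1650))),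
   ("Excellent (1550-1649)", ranked.filter (fun p => decide (1550 ≤ p.2 ∧ p.2 < 1650))),
   ("Good (1450-1549)", ranked.filter (fun p => decide (1450 ≤ p.2 ∧ p.2 < 1550))),
   ("Average (1350-1449)", ranked.filter (fun p => decide (1350 ≤ p.2 ∧ p.2 < 1450))),
   ("Below Average (<1350)", ranked.filter (fun p => decide (p.2 < 1350)))]

-- ===== PRECONDITION & SPEC =====
def Spec_create_rating_categories (fighter_ratings : List (String × Int)) (out : List (String × List (String × Int))) : Prop := out = create_rating_categories_alt fighter_ratings
instance (fighter_ratings : List (String × Int)) (out : List (String × List (String × Int))) : Decidable (Spec_create_rating_categories fighter_ratings out) := by unfold Spec_create_rating_categories; infer_instance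

-- ===== CLAIM (what is proved, stated in full; the proofs are below) =====
def Claim_equal_create_rating_categories : Prop := ∀ (fighter_ratings : List (String × Int)), Dom_create_rating_categories fighter_ratings → Spec_create_rating_categories fighter_ratings (create_rating_categories fighter_ratings)

-- ===== LEMMAS AND PROOFS =====

-- the five bucket predicates of the threshold ladder
def pvQ1 (x : String × Int) : Bool := 1650 ≤ x.2
def pvQ2 (x : String × Int) : Bool := !(1650 ≤ x.2) && 1550 ≤ x.2
def pvQ3 (x : String × Int) : Bool := !(1650 ≤ x.2) && !(1550 ≤ x.2) && 1450 ≤ x.2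
def pvQ4 (x : String × Int) : Bool := !(1650 ≤ x.2) && !(1550 ≤ x.2) && !(1450 ≤ x.2) && 1350 ≤ x.2
def pvQ5 (x : String × Int) : Bool := !(1650 ≤ x.2) && !(1550 ≤ x.2) && !(1450 ≤ x.2) && !(1350 ≤ x.2)

-- the dict state: five fixed keys with arbitrary bucket contents
def pvD (a1 a2 a3 a4 a5 : List (String × Int)) : PySem.Dict String (List (String × Int)) :=
  PySem.Dict.mk [("Elite (1650+)", a1), ("Excellent (1550-1649)", a2),
    ("Good (1450-1549)", a3), ("Average (1350-1449)", a4), ("Below Average (<1350)", a5)]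

def pvStep (cats : PySem.Dict String (List (String × Int))) (fr : String × Int) :
    PySem.Dict String (List (String × Int)) :=
  if fr.2 ≥ 1650 then cats.modify "Elite (1650+)" [] (· ++ [(fr.1, fr.2)])
  else if fr.2 ≥ 1550 then cats.modify "Excellent (1550-1649)" [] (· ++ [(fr.1, fr.2)])
  else if fr.2 ≥ 1450 then cats.modify "Good (1450-1549)" [] (· ++ [(fr.1, fr.2)])
  else if fr.2 ≥ 1350 then cats.modify "Average (1350-1449)" [] (· ++ [(fr.1, fr.2)])
  else cats.modify "Below Average (<1350)" [] (· ++ [(fr.1, fr.2)])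

lemma pvStep_D (a1 a2 a3 a4 a5 : List (String × Int)) (x : String × Int) :
    pvStep (pvD a1 a2 a3 a4 a5) x =
      pvD (a1 ++ if pvQ1 x then [x] else []) (a2 ++ if pvQ2 x then [x] else [])
        (a3 ++ if pvQ3 x then [x] else []) (a4 ++ if pvQ4 x then [x] else [])
        (a5 ++ if pvQ5 x then [x] else []) := by
  obtain ⟨f, r⟩ := x
  simp only [pvStep, pvQ1, pvQ2, pvQ3, pvQ4, pvQ5]
  by_cases h1 : (1650:Int) ≤ r
  · rw [if_pos (show (f,r).2 ≥ 1650 from h1), if_pos (by simp [h1]), if_neg (by simp [h1]),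
      if_neg (by simp [h1]), if_neg (by simp [h1]), if_neg (by simp [h1])]
    simp only [List.append_nil]; rfl
  · rw [if_neg (show ¬ ((f,r).2 ≥ 1650) from h1)]
    by_cases h2 : (1550:Int) ≤ r
    · rw [if_pos (show (f,r).2 ≥ 1550 from h2), if_neg (by simp [h1]), if_pos (by simp [h1, h2]),
        if_neg (by simp; omega), if_neg (by simp; omega), if_neg (by simp; omega)]
      simp only [List.append_nil]; rfl
    · rw [if_neg (show ¬ ((f,r).2 ≥ 1550) from h2)]
      by_cases h3 : (1450:Int) ≤ r
      · rw [if_pos (show (f,r).2 ≥ 1450 from h3), if_neg (by simp [h1]), if_neg (by simp; omega),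
          if_pos (by simp [h1, h2, h3]), if_neg (by simp; omega), if_neg (by simp; omega)]
        simp only [List.append_nil]; rfl
      · rw [if_neg (show ¬ ((f,r).2 ≥ 1450) from h3)]
        by_cases h4 : (1350:Int) ≤ r
        · rw [if_pos (show (f,r).2 ≥ 1350 from h4), if_neg (by simp [h1]), if_neg (by simp; omega),
            if_neg (by simp; omega), if_pos (by simp [h1, h2, h3, h4]), if_neg (by simp; omega)]
          simp only [List.append_nil]; rfl
        · rw [if_neg (show ¬ ((f,r).2 ≥ 1350) from h4), if_neg (by simp [h1]),
            if_neg (by simp; omega), if_neg (by simp; omega), if_neg (by simp; omega),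
            if_pos (by simp [h1, h2, h3, h4])]
          simp only [List.append_nil]; rfl

lemma pvFoldD (xs : List (String × Int)) : ∀ a1 a2 a3 a4 a5,
    xs.foldl pvStep (pvD a1 a2 a3 a4 a5) =
      pvD (a1 ++ xs.filter pvQ1) (a2 ++ xs.filter pvQ2) (a3 ++ xs.filter pvQ3)
        (a4 ++ xs.filter pvQ4) (a5 ++ xs.filter pvQ5) := by
  induction xs with
  | nil => intro a1 a2 a3 a4 a5; simp
  | cons x t ih =>
    intro a1 a2 a3 a4 a5
    rw [List.foldl_cons, pvStep_D, ih]
    simp [List.filter_cons, pvQ1, pvQ2, pvQ3, pvQ4, pvQ5]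
    split_ifs <;> simp_all

lemma pvSortPass (a1 a2 a3 a4 a5 : List (String × Int)) :
    ((pvD a1 a2 a3 a4 a5).keys.foldl (fun cats c =>
        cats.insert c (PySem.List.sorted (cats.getD c []) (fun x => x.2) true))
      (pvD a1 a2 a3 a4 a5)).items =
    [("Elite (1650+)", PySem.List.sorted a1 (fun x => x.2) true),
     ("Excellent (1550-1649)", PySem.List.sorted a2 (fun x => x.2) true),
     ("Good (1450-1549)", PySem.List.sorted a3 (fun x => x.2) true),
     ("Average (1350-1449)", PySem.List.sorted a4 (fun x => x.2) true),
     ("Below Average (<1350)", PySem.List.sorted a5 (fun x => x.2) true)] := by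
  simp [pvD, PySem.Dict.keys, PySem.Dict.insert, PySem.Dict.getD, PySem.Dict.get?,
    PySem.Dict.contains, List.foldl]

-- stable descending insertion: helper facts about insertBy
lemma pvInsertBy_all_before {α : Type} (bf : α → α → Bool) (x : α) (l : List α)
    (h : ∀ z ∈ l, bf x z = true) : PySem.List.insertBy bf x l = x :: l := by
  cases l with
  | nil => rfl
  | cons y t => simp [PySem.List.insertBy, h y (by simp)]

lemma pvInsertBy_pairwise (k : (String × Int) → Int) (x : String × Int) (l : List (String × Int))
    (h : l.Pairwise (fun a b => k b ≤ k a)) :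
    (PySem.List.insertBy (fun a b => decide (k b < k a)) x l).Pairwise (fun a b => k b ≤ k a) := by
  induction l with
  | nil => simp [PySem.List.insertBy]
  | cons y t ih =>
    rw [List.pairwise_cons] at h
    by_cases hb : k y < k x
    · simp only [PySem.List.insertBy, decide_eq_true_eq, if_pos hb]
      refine List.Pairwise.cons ?_ (List.Pairwise.cons h.1 h.2)
      intro z hz
      rcases List.mem_cons.mp hz with rfl | hz
      · omega
      · have := h.1 z hz; omega
    · simp only [PySem.List.insertBy, decide_eq_true_eq, if_neg hb]
      refine List.Pairwise.cons ?_ (ih h.2)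
      intro z hz
      rcases (PySem.List.mem_insertBy _ _ _ _).mp hz with rfl | hz
      · omega
      · exact h.1 z hz

lemma pvFilter_insertBy_neg {α : Type} (bf : α → α → Bool) (p : α → Bool) (x : α)
    (l : List α) (hx : p x = false) :
    (PySem.List.insertBy bf x l).filter p = l.filter p := by
  induction l with
  | nil => simp [PySem.List.insertBy, hx]
  | cons y t ih =>
    by_cases hb : bf x y = true
    · simp [PySem.List.insertBy, hb, hx]
    · simp only [PySem.List.insertBy, if_neg hb]
      by_cases hy : p y = true <;> simp [hy, ih]

lemma pvFilter_insertBy_pos (k : (String × Int) → Int) (p : (String × Int) → Bool)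
    (x : String × Int) (l : List (String × Int)) (hx : p x = true)
    (h : l.Pairwise (fun a b => k b ≤ k a)) :
    (PySem.List.insertBy (fun a b => decide (k b < k a)) x l).filter p =
      PySem.List.insertBy (fun a b => decide (k b < k a)) x (l.filter p) := by
  induction l with
  | nil => simp [PySem.List.insertBy, hx]
  | cons y t ih =>
    rw [List.pairwise_cons] at h
    by_cases hb : k y < k x
    · simp only [PySem.List.insertBy, decide_eq_true_eq, if_pos hb]
      rw [List.filter_cons_of_pos hx]
      rw [pvInsertBy_all_before]
      intro z hz
      have hz' : z ∈ y :: t := List.mem_of_mem_filter hz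
      rcases List.mem_cons.mp hz' with rfl | hz''
      · simp; omega
      · have := h.1 z hz''; simp; omega
    · simp only [PySem.List.insertBy, decide_eq_true_eq, if_neg hb]
      by_cases hy : p y = true
      · rw [List.filter_cons_of_pos hy, List.filter_cons_of_pos hy, ih h.2]
        have : ¬ (k y < k x) := hb
        simp [PySem.List.insertBy, this]
      · rw [List.filter_cons_of_neg (by simp [hy]), List.filter_cons_of_neg (by simp [hy]),
          ih h.2]

lemma pvFilterFold (k : (String × Int) → Int) (p : (String × Int) → Bool)
    (xs : List (String × Int)) : ∀ (acc : List (String × Int)),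
    acc.Pairwise (fun a b => k b ≤ k a) →
    (xs.foldl (fun acc x => PySem.List.insertBy (fun a b => decide (k b < k a)) x acc) acc).filter p
      = (xs.filter p).foldl (fun acc x => PySem.List.insertBy (fun a b => decide (k b < k a)) x acc)
          (acc.filter p) := by
  induction xs with
  | nil => intro acc _; rfl
  | cons x t ih =>
    intro acc hacc
    rw [List.foldl_cons, ih _ (pvInsertBy_pairwise k x acc hacc)]
    by_cases hx : p x = true
    · rw [pvFilter_insertBy_pos k p x acc hx hacc, List.filter_cons_of_pos hx, List.foldl_cons]
    · rw [pvFilter_insertBy_neg _ p x acc (by simpa using hx),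
        List.filter_cons_of_neg (by simp [hx])]

-- filtering commutes with the stable descending sort
lemma pvFilter_sorted (p : (String × Int) → Bool) (xs : List (String × Int)) :
    (PySem.List.sorted xs (fun x => x.2) true).filter p =
      PySem.List.sorted (xs.filter p) (fun x => x.2) true := by
  rw [PySem.List.sorted_rev_eq_foldl_insertBy, PySem.List.sorted_rev_eq_foldl_insertBy]
  exact pvFilterFold (fun x => x.2) p xs [] (by simp)

lemma pvPortA (xs : List (String × Int)) :
    create_rating_categories xs =
      [("Elite (1650+)", PySem.List.sorted (xs.filter pvQ1) (fun x => x.2) true),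
       ("Excellent (1550-1649)", PySem.List.sorted (xs.filter pvQ2) (fun x => x.2) true),
       ("Good (1450-1549)", PySem.List.sorted (xs.filter pvQ3) (fun x => x.2) true),
       ("Average (1350-1449)", PySem.List.sorted (xs.filter pvQ4) (fun x => x.2) true),
       ("Below Average (<1350)", PySem.List.sorted (xs.filter pvQ5) (fun x => x.2) true)] := by
  show ((xs.foldl pvStep (pvD [] [] [] [] [])).keys.foldl _ (xs.foldl pvStep (pvD [] [] [] [] []))).items = _
  rw [pvFoldD]
  simp only [List.nil_append]
  exact pvSortPass _ _ _ _ _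

-- B's range predicates agree pointwise with the ladder predicates
lemma pvPortB (xs : List (String × Int)) :
    create_rating_categories_alt xs =
      [("Elite (1650+)", (PySem.List.sorted xs (fun x => x.2) true).filter pvQ1),
       ("Excellent (1550-1649)", (PySem.List.sorted xs (fun x => x.2) true).filter pvQ2),
       ("Good (1450-1549)", (PySem.List.sorted xs (fun x => x.2) true).filter pvQ3),
       ("Average (1350-1449)", (PySem.List.sorted xs (fun x => x.2) true).filter pvQ4),
       ("Below Average (<1350)", (PySem.List.sorted xs (fun x => x.2) true).filter pvQ5)] := by
  have h1 : (fun p : String × Int => decide (p.2 ≥ 1650)) = pvQ1 := by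
    funext x; rw [Bool.eq_iff_iff]; simp [pvQ1]
  have h2 : (fun p : String × Int => decide (1550 ≤ p.2 ∧ p.2 < 1650)) = pvQ2 := by
    funext x; rw [Bool.eq_iff_iff]; simp [pvQ2]; omega
  have h3 : (fun p : String × Int => decide (1450 ≤ p.2 ∧ p.2 < 1550)) = pvQ3 := by
    funext x; rw [Bool.eq_iff_iff]; simp [pvQ3]; omega
  have h4 : (fun p : String × Int => decide (1350 ≤ p.2 ∧ p.2 < 1450)) = pvQ4 := by
    funext x; rw [Bool.eq_iff_iff]; simp [pvQ4]; omega
  have h5 : (fun p : String × Int => decide (p.2 < 1350)) = pvQ5 := by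
    funext x; rw [Bool.eq_iff_iff]; simp [pvQ5]; omega
  simp only [create_rating_categories_alt, h1, h2, h3, h4, h5]

-- ===== VERDICT (by name: the statement is the Claim_ definition above) =====
theorem create_rating_categories_spec : Claim_equal_create_rating_categories := by
  intro xs _
  unfold Spec_create_rating_categories
  rw [pvPortA, pvPortB]
  simp only [pvFilter_sorted]
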